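-- pv_equiv track=rewrite | github.com/aanaolaru/Python | Lab 2/ex 9.py | spectators
-- ===== SOURCE A (Python) =====
-- def spectators(heights: list):
--     res = []
--     for col in range(0, len(heights[0])):
--         max_height = heights[0][col]
--         for row in range(1, len(heights)):
--             if heights[row][col] <= max_height:
--                 res.append((row, col))
--             else:
--                 max_height = heights[row][col]
--     return res
-- ===== SOURCE B (Python) =====
-- def spectators(heights: list):
--     res = []
--     for col in range(0, len(heights[0])):
--         for row in range(1, len(heights)):
--             if any(heights[i][col] >= heights[row][col] for i in range(row)):
--                 res.append((row, col))
--     return res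
-- ===== Notes on version B (the rewrite author's own statement) =====
-- stated objective: alternative
-- what changed: Drops the running max_height accumulator: each spectator (row,col) is judged independently by scanning all earlier rows in its column with any(heights[i][col] >= heights[row][col] for i in range(row)), keeping column-major order.
import Mathlib
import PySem

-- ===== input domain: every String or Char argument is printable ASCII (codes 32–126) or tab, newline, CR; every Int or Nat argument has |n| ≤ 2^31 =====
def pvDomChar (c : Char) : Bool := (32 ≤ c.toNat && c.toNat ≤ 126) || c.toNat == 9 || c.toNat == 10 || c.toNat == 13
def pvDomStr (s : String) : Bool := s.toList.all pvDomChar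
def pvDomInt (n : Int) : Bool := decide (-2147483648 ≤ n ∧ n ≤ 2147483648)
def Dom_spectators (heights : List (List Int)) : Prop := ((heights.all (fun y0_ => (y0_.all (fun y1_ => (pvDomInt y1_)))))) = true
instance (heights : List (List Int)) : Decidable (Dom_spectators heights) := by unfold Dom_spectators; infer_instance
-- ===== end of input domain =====

-- B replaces A's running-max accumulator by an independent scan of earlier rows in the column
-- (alternative decomposition, same column-major output).

-- ===== PORT A =====
def spectators (heights : List (List Int)) : List (Int × Int) :=
  (PySem.List.pyRange 0 ((PySem.List.pyGetD heights 0 []).length : Int) 1).foldl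
    (fun res col =>
      ((PySem.List.pyRange 1 (heights.length : Int) 1).foldl
        (fun (st : Int × List (Int × Int)) row =>
          if PySem.List.pyGetD (PySem.List.pyGetD heights row []) col 0 ≤ st.1 then
            (st.1, st.2 ++ [(row, col)])
          else
            (PySem.List.pyGetD (PySem.List.pyGetD heights row []) col 0, st.2))
        (PySem.List.pyGetD (PySem.List.pyGetD heights 0 []) col 0, res)).2)
    []

-- ===== PORT B =====
def spectators_alt (heights : List (List Int)) : List (Int × Int) :=
  (PySem.List.pyRange 0 ((PySem.List.pyGetD heights 0 []).length : Int) 1).foldl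
    (fun res col =>
      (PySem.List.pyRange 1 (heights.length : Int) 1).foldl
        (fun res row =>
          if (PySem.List.pyRange 0 row 1).any
              (fun i => PySem.List.pyGetD (PySem.List.pyGetD heights i []) col 0 ≥
                        PySem.List.pyGetD (PySem.List.pyGetD heights row []) col 0) then
            res ++ [(row, col)]
          else res)
        res)
    []

-- ===== PRECONDITION & SPEC =====
-- Pre_ excludes exactly the inputs where Python A raises IndexError: the empty grid
-- (heights[0] fails) and ragged grids where some row is shorter than row 0.
def Pre_spectators (heights : List (List Int)) : Prop :=
  heights ≠ [] ∧ ∀ r ∈ heights, heights.headI.length ≤ r.length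
instance (heights : List (List Int)) : Decidable (Pre_spectators heights) := by unfold Pre_spectators; infer_instance

def pvWitness_spectators : List (List Int) := [[3, 1], [2, 4], [2, 4]]

def Spec_spectators (heights : List (List Int)) (out : List (Int × Int)) : Prop := out = spectators_alt heights
instance (heights : List (List Int)) (out : List (Int × Int)) : Decidable (Spec_spectators heights out) := by unfold Spec_spectators; infer_instance

-- ===== CLAIM (what is proved, stated in full; the proofs are below) =====
def Claim_equal_spectators : Prop := ∀ (heights : List (List Int)), Dom_spectators heights → Pre_spectators heights → Spec_spectators heights (spectators heights)

-- ===== LEMMAS AND PROOFS =====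

-- For a fixed column, A's inner loop with running max m equals B's inner loop,
-- provided m is a maximum of the already-processed prefix h 0 … h (a-1).
theorem spectators_inner (h : Int → Int) (col : Int) :
    ∀ (fuel : Nat) (a n : Int), (n - a).toNat ≤ fuel → 1 ≤ a →
    ∀ (m : Int) (res : List (Int × Int)),
      (∀ i, 0 ≤ i → i < a → h i ≤ m) → (∃ i, 0 ≤ i ∧ i < a ∧ h i = m) →
      ((PySem.List.pyRange a n 1).foldl
        (fun (st : Int × List (Int × Int)) row =>
          if h row ≤ st.1 then (st.1, st.2 ++ [(row, col)]) else (h row, st.2)) (m, res)).2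
      = (PySem.List.pyRange a n 1).foldl
          (fun res row =>
            if (PySem.List.pyRange 0 row 1).any (fun i => h i ≥ h row) then res ++ [(row, col)]
            else res) res := by
  intro fuel
  induction fuel with
  | zero =>
    intro a n hfuel _ m res _ _
    rw [PySem.List.pyRange_one_eq_nil (by omega)]
    rfl
  | succ k ih =>
    intro a n hfuel ha m res hub hex
    by_cases hlt : a < n
    · rw [PySem.List.pyRange_one_cons hlt]
      simp only [List.foldl_cons]
      cases hb : (PySem.List.pyRange 0 a 1).any (fun i => decide (h i ≥ h a)) with
      | true =>
        have hc : h a ≤ m := by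
          rw [List.any_eq_true] at hb
          obtain ⟨i, hi, hge⟩ := hb
          rw [PySem.List.mem_pyRange_one] at hi
          simp only [ge_iff_le, decide_eq_true_eq] at hge
          exact le_trans hge (hub i hi.1 hi.2)
        rw [if_pos hc, if_pos rfl]
        exact ih (a + 1) n (by omega) (by omega) m (res ++ [(a, col)])
          (fun i hi0 hia => by rcases lt_or_eq_of_le (by omega : i ≤ a) with h' | h'
                               · exact hub i hi0 h'
                               · exact h' ▸ hc)
          (by obtain ⟨i, hi0, hia, him⟩ := hex; exact ⟨i, hi0, by omega, him⟩)
      | false =>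
        have hc : ¬ h a ≤ m := by
          intro hle
          obtain ⟨i, hi0, hia, him⟩ := hex
          have : (PySem.List.pyRange 0 a 1).any (fun i => decide (h i ≥ h a)) = true := by
            rw [List.any_eq_true]
            exact ⟨i, by rw [PySem.List.mem_pyRange_one]; exact ⟨hi0, hia⟩,
                   by simp only [ge_iff_le, decide_eq_true_eq]; omega⟩
          simp [this] at hb
        rw [if_neg hc, if_neg (by simp)]
        exact ih (a + 1) n (by omega) (by omega) (h a) res
          (fun i hi0 hia => by rcases lt_or_eq_of_le (by omega : i ≤ a) with h' | h'
                               · exact le_of_lt (lt_of_le_of_lt (hub i hi0 h') (by omega))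
                               · exact h' ▸ le_refl _)
          ⟨a, by omega, by omega, rfl⟩
    · rw [PySem.List.pyRange_one_eq_nil (by omega)]
      rfl

-- ===== VERDICT (by name: the statement is the Claim_ definition above) =====
theorem spectators_spec : Claim_equal_spectators := by
  intro heights _ _
  unfold Spec_spectators spectators spectators_alt
  apply PySem.List.foldl_congr_mem
  intro res col _
  exact spectators_inner
    (fun i => PySem.List.pyGetD (PySem.List.pyGetD heights i []) col 0) col
    ((heights.length : Int) - 1).toNat 1 (heights.length : Int) (by omega) le_rfl
    (PySem.List.pyGetD (PySem.List.pyGetD heights 0 []) col 0) res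
    (fun i hi0 hi1 => by have : i = 0 := by omega
                         simp [this])
    ⟨0, le_rfl, by omega, rfl⟩
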